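-- pv_equiv track=rewrite | github.com/koii-network/prometheus-beta | src/subsequence_validator.py | can_divide_into_subsequences
-- ===== SOURCE A (Python) =====
-- def can_divide_into_subsequences(s: str) -> bool:
--     """
--     Determine if a string of lowercase English letters can be divided into
--     subsequences of at least 2 letters where each subsequence is all vowels or all consonants.
--
--     Args:
--         s (str): Input string of lowercase English letters
--
--     Returns:
--         bool: True if the string can be divided into valid subsequences, False otherwise
--     """
--     # Check if string is too short to divide
--     if len(s) < 2:
--         return False
--
--     # Define vowels and consonants
--     vowels = set('aeiou')
--
--     # Helper function to check if a subsequence is valid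
--     def is_valid_subsequence(subseq):
--         return len(subseq) >= 2 and (
--             all(c in vowels for c in subseq) or
--             all(c not in vowels for c in subseq)
--         )
--
--     # Try all possible ways to divide the string
--     def backtrack(index):
--         # Base case: reached the end of the string successfully
--         if index == len(s):
--             return True
--
--         # Try subsequences starting from current index
--         for end in range(index + 1, len(s) + 1):
--             subseq = s[index:end]
--
--             # Check if the current subsequence is valid
--             # and the rest of the string can be divided
--             if is_valid_subsequence(subseq) and backtrack(end):
--                 return True
--
--         return False
--
--     return backtrack(0)
-- ===== SOURCE B (Python) =====
-- def can_divide_into_subsequences(s: str) -> bool: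
--     # Linear scan: valid iff len(s) >= 2 and no maximal vowel/consonant run has length 1.
--     if len(s) < 2:
--         return False
--     vowels = set('aeiou')
--     run = 1
--     for i in range(1, len(s)):
--         if (s[i] in vowels) == (s[i - 1] in vowels):
--             run += 1
--         else:
--             if run < 2:
--                 return False
--             run = 1
--     return run >= 2
-- ===== Notes on version B (the rewrite author's own statement) =====
-- stated objective: faster
-- what changed: Replaces the exponential backtracking over all block partitions with a single linear scan checking that the string has length >= 2 and no maximal vowel/consonant run has length 1.
import Mathlib
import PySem

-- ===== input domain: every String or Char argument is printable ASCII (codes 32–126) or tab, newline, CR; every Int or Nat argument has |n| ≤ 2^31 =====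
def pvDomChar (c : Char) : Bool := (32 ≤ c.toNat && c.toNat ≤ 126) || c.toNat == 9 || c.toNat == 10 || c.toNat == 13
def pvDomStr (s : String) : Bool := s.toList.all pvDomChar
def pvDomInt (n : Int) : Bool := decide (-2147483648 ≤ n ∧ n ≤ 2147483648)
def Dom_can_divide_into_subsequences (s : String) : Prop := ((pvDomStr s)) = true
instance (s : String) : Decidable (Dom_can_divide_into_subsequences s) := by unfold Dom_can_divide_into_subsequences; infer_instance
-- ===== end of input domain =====

-- B replaces A's exponential backtracking over all partitions by a linear scan over maximal
-- vowel/consonant runs (objective: faster, asymptotic).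

-- ===== PORT A =====
-- vowels = set('aeiou'); `c in vowels`
def pvIsVowel (c : Char) : Bool := ['a', 'e', 'i', 'o', 'u'].contains c

-- is_valid_subsequence
def pvValidSub (sub : List Char) : Bool :=
  decide (2 ≤ sub.length) && (sub.all pvIsVowel || sub.all (fun c => !pvIsVowel c))

-- backtrack(index): the `for end in range(index+1, len(s)+1)` loop with early return
-- is the `any` over the list of ends [i+1, …, len].
def pvBacktrack (l : List Char) (i : Nat) : Bool :=
  if i = l.length then true
  else (List.range' (i + 1) (l.length - i)).attach.any (fun e =>
    pvValidSub (PySem.List.slice l (some (i : Int)) (some (e.1 : Int))) && pvBacktrack l e.1)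
termination_by l.length - i
decreasing_by
  have := List.mem_range'_1.mp e.2
  omega

def can_divide_into_subsequences (s : String) : Bool :=
  let l := s.toList
  if l.length < 2 then false
  else pvBacktrack l 0

-- ===== PORT B =====
-- the scan loop: prev = previous char, run = length of the current homogeneous run
def pvGo (prev : Char) (run : Nat) : List Char → Bool
  | [] => decide (2 ≤ run)
  | c :: cs =>
    if pvIsVowel c == pvIsVowel prev then pvGo c (run + 1) cs
    else if run < 2 then false
    else pvGo c 1 cs

def can_divide_into_subsequences_alt (s : String) : Bool :=
  match s.toList with
  | c :: d :: cs => pvGo c 1 (d :: cs)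
  | _ => false

-- ===== PRECONDITION & SPEC =====
def Spec_can_divide_into_subsequences (s : String) (out : Bool) : Prop := out = can_divide_into_subsequences_alt s
instance (s : String) (out : Bool) : Decidable (Spec_can_divide_into_subsequences s out) := by unfold Spec_can_divide_into_subsequences; infer_instance

-- ===== CLAIM (what is proved, stated in full; the proofs are below) =====
def Claim_equal_can_divide_into_subsequences : Prop := ∀ (s : String), Dom_can_divide_into_subsequences s → Spec_can_divide_into_subsequences s (can_divide_into_subsequences s)

-- ===== LEMMAS AND PROOFS =====

-- a block is homogeneous: any two of its characters are of the same class
def PHom (l : List Char) : Prop := ∀ x ∈ l, ∀ y ∈ l, pvIsVowel x = pvIsVowel y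

-- a string is partitionable into homogeneous blocks of length ≥ 2
inductive PPart : List Char → Prop
  | nil : PPart []
  | cons (blk rest : List Char) : 2 ≤ blk.length → PHom blk → PPart rest → PPart (blk ++ rest)

lemma phom_of_const {b : Bool} {l : List Char} (h : ∀ x ∈ l, pvIsVowel x = b) : PHom l := by
  intro x hx y hy; rw [h x hx, h y hy]

lemma validSub_iff (sub : List Char) : pvValidSub sub = true ↔ 2 ≤ sub.length ∧ PHom sub := by
  unfold pvValidSub
  simp only [Bool.and_eq_true, decide_eq_true_eq, Bool.or_eq_true, List.all_eq_true,
    Bool.not_eq_eq_eq_not, Bool.not_true]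
  constructor
  · rintro ⟨h2, hv | hv⟩
    · exact ⟨h2, phom_of_const (b := true) hv⟩
    · exact ⟨h2, phom_of_const (b := false) hv⟩
  · rintro ⟨h2, hhom⟩
    refine ⟨h2, ?_⟩
    match sub, h2 with
    | c :: cs, _ =>
      cases hc : pvIsVowel c with
      | true => exact Or.inl (fun x hx => (hhom x hx c (by simp)).trans hc)
      | false => exact Or.inr (fun x hx => (hhom x hx c (by simp)).trans hc)

lemma part_cons {b : Bool} {pend tail : List Char}
    (hhom : ∀ x ∈ pend, pvIsVowel x = b) (h2 : 2 ≤ pend.length) (hp : PPart tail) :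
    PPart (pend ++ tail) :=
  PPart.cons pend tail h2 (phom_of_const hhom) hp

-- the hard direction: if pend is a nonempty homogeneous run of class b and tail starts with
-- the other class (or is empty), a partition of pend ++ tail forces 2 ≤ |pend| and PPart tail
lemma part_split (b : Bool) : ∀ (n : Nat) (pend tail : List Char), pend.length = n →
    pend ≠ [] → (∀ x ∈ pend, pvIsVowel x = b) →
    (∀ c, tail.head? = some c → pvIsVowel c ≠ b) →
    PPart (pend ++ tail) → 2 ≤ pend.length ∧ PPart tail := by
  intro n
  induction n using Nat.strong_induction_on with
  | _ n IH =>
    intro pend tail hlen hne hhom htail hp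
    generalize heq' : pend ++ tail = L at hp
    cases hp with
    | nil =>
      exact absurd (List.append_eq_nil_iff.mp heq').1 hne
    | cons blk rest h2 hhomb hrest =>
      have heq : blk ++ rest = pend ++ tail := heq'.symm
      have hble : blk.length ≤ pend.length := by
        by_contra hgt
        rw [Nat.not_le] at hgt
        -- tail must be nonempty
        have hlens : blk.length + rest.length = pend.length + tail.length := by
          have := congrArg List.length heq
          simpa using this
        have htne : tail ≠ [] := by
          intro h; rw [h] at hlens; simp at hlens; omega
        obtain ⟨c, ts, hts⟩ := List.exists_cons_of_ne_nil htne
        have hpos : 0 < pend.length := List.length_pos_of_ne_nil hne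
        -- index 0 and index pend.length both land in blk
        have h0 : blk[0]'(by omega) = pend[0]'hpos := by
          have := congrArg (fun l => l[0]?) heq
          simpa [List.getElem?_append_left, hpos, Nat.lt_of_lt_of_le hpos (le_of_lt hgt),
            List.getElem?_eq_getElem, show 0 < blk.length by omega] using this
        have hc : blk[pend.length]'hgt = c := by
          have := congrArg (fun l => l[pend.length]?) heq
          simp only [List.getElem?_append_left hgt, hts] at this
          rw [List.getElem?_append_right (le_refl pend.length)] at this
          simpa [List.getElem?_eq_getElem, hgt] using this
        have hmem0 : blk[0]'(by omega) ∈ blk := List.getElem_mem _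
        have hmemc : blk[pend.length]'hgt ∈ blk := List.getElem_mem _
        have heqv : pvIsVowel (blk[0]'(by omega)) = pvIsVowel (blk[pend.length]'hgt) :=
          hhomb _ hmem0 _ hmemc
        have hb0 : pvIsVowel (pend[0]'hpos) = b := hhom _ (List.getElem_mem _)
        have hbc : pvIsVowel c ≠ b := htail c (by rw [hts]; rfl)
        rw [h0, hc, hb0] at heqv
        exact hbc heqv.symm
      -- blk is a prefix of pend
      have hblk : blk = pend.take blk.length := by
        have h1 : (blk ++ rest).take blk.length = blk := by simp
        have h2' : (pend ++ tail).take blk.length = pend.take blk.length :=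
          List.take_append_of_le_length hble
        rw [heq, h2'] at h1; exact h1.symm
      have hrst : rest = pend.drop blk.length ++ tail := by
        have h1 : (blk ++ rest).drop blk.length = rest := by simp
        have h2' : (pend ++ tail).drop blk.length = pend.drop blk.length ++ tail :=
          List.drop_append_of_le_length hble
        rw [heq, h2'] at h1; exact h1.symm
      rcases Nat.eq_or_lt_of_le hble with hEq | hLt
      · -- blk = pend, rest = tail
        have : pend.drop blk.length = [] := by rw [hEq]; simp
        rw [hrst, this, List.nil_append] at hrest
        exact ⟨by omega, hrest⟩
      · -- recurse on the shorter pending run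
        have hdne : pend.drop blk.length ≠ [] := by
          intro h
          have := congrArg List.length h
          simp at this; omega
        have hdlen : (pend.drop blk.length).length < n := by
          simp only [List.length_drop]; omega
        have hdhom : ∀ x ∈ pend.drop blk.length, pvIsVowel x = b := fun x hx =>
          hhom x (List.mem_of_mem_drop hx)
        rw [hrst] at hrest
        obtain ⟨_, hpt⟩ := IH _ hdlen (pend.drop blk.length) tail rfl hdne hdhom htail hrest
        exact ⟨by omega, hpt⟩

-- correctness of B's scan loop
lemma go_iff : ∀ (cs : List Char) (prev : Char) (run : Nat) (pend : List Char),
    pend ≠ [] → pend.length = run → (∀ x ∈ pend, pvIsVowel x = pvIsVowel prev) →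
    (pvGo prev run cs = true ↔ PPart (pend ++ cs)) := by
  intro cs
  induction cs with
  | nil =>
    intro prev run pend hne hlen hhom
    simp only [pvGo, decide_eq_true_eq, List.append_nil]
    constructor
    · intro h2
      have := part_cons (b := pvIsVowel prev) hhom (by omega) PPart.nil
      simpa using this
    · intro hp
      have := part_split (pvIsVowel prev) pend.length pend [] rfl hne hhom
        (by intro c hc; simp at hc) (by simpa using hp)
      omega
  | cons c cs ih =>
    intro prev run pend hne hlen hhom
    by_cases hc : pvIsVowel c = pvIsVowel prev
    · rw [show pvGo prev run (c :: cs) = pvGo c (run + 1) cs by simp [pvGo, hc]]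
      have hhom' : ∀ x ∈ pend ++ [c], pvIsVowel x = pvIsVowel c := by
        intro x hx
        rcases List.mem_append.mp hx with h | h
        · rw [hhom x h, hc]
        · simp at h; rw [h]
      have := ih c (run + 1) (pend ++ [c]) (by simp) (by simp [hlen]) hhom'
      rw [this]
      simp [List.append_assoc]
    · rw [show pvGo prev run (c :: cs) = if run < 2 then false else pvGo c 1 cs by
        simp [pvGo, hc]]
      have hsplit := part_split (pvIsVowel prev) pend.length pend (c :: cs) rfl hne hhom
        (by intro d hd; simp at hd; subst hd; exact hc)
      by_cases hr : run < 2
      · simp only [if_pos hr, Bool.false_eq_true, false_iff]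
        intro hp
        have := hsplit hp
        omega
      · rw [if_neg hr]
        have hiff := ih c 1 [c] (by simp) (by simp) (by simp)
        rw [hiff, List.singleton_append]
        constructor
        · intro hp
          exact part_cons (b := pvIsVowel prev) hhom (by omega) hp
        · intro hp
          exact (hsplit hp).2

-- correctness of A's backtracking
lemma backtrack_iff_aux (l : List Char) : ∀ (n i : Nat), l.length - i = n → i ≤ l.length →
    (pvBacktrack l i = true ↔ PPart (l.drop i)) := by
  intro n
  induction n using Nat.strong_induction_on with
  | _ n IH =>
    intro i hn hi
    rw [pvBacktrack]
    by_cases h : i = l.length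
    · subst h
      rw [if_pos rfl, List.drop_length]
      simpa using PPart.nil
    · rw [if_neg h]
      have hi' : i < l.length := lt_of_le_of_ne hi h
      constructor
      · intro hany
        obtain ⟨⟨e, he⟩, -, hf⟩ := List.any_eq_true.mp hany
        rw [Bool.and_eq_true] at hf
        obtain ⟨hv, hbt⟩ := hf
        have hbounds := List.mem_range'_1.mp he
        rw [PySem.List.slice_natCast] at hv
        rw [validSub_iff] at hv
        have hpe : PPart (l.drop e) :=
          (IH (l.length - e) (by omega) e rfl (by omega)).mp hbt
        have hdd : (l.drop i).drop (e - i) = l.drop e := by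
          rw [List.drop_drop]
          congr 1
          omega
        have hsplit : l.drop i = (l.drop i).take (e - i) ++ l.drop e := by
          rw [← hdd, List.take_append_drop]
        rw [hsplit]
        exact PPart.cons _ _ hv.1 hv.2 hpe
      · intro hp
        generalize heq' : l.drop i = L at hp
        cases hp with
        | nil =>
          have := congrArg List.length heq'
          simp at this; omega
        | cons blk rest h2 hhom hrest =>
          have heq : l.drop i = blk ++ rest := heq'
          have hlen : l.length - i = blk.length + rest.length := by
            have := congrArg List.length heq
            simpa using this
          have hmem : i + blk.length ∈ List.range' (i + 1) (l.length - i) :=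
            List.mem_range'_1.mpr ⟨by omega, by omega⟩
          refine List.any_eq_true.mpr ⟨⟨i + blk.length, hmem⟩, List.mem_attach _ _, ?_⟩
          rw [Bool.and_eq_true]
          constructor
          · rw [PySem.List.slice_natCast]
            have : (l.drop i).take (i + blk.length - i) = blk := by
              rw [heq, show i + blk.length - i = blk.length by omega]
              simp
            rw [this]
            exact (validSub_iff blk).mpr ⟨h2, hhom⟩
          · refine (IH (l.length - (i + blk.length)) (by omega) _ rfl (by omega)).mpr ?_
            have hdd2 : (l.drop i).drop blk.length = l.drop (i + blk.length) := by
              rw [List.drop_drop]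
            have : l.drop (i + blk.length) = rest := by
              rw [← hdd2, heq]
              simp
            rw [this]
            exact hrest

-- ===== VERDICT (by name: the statement is the Claim_ definition above) =====
theorem can_divide_into_subsequences_spec : Claim_equal_can_divide_into_subsequences := by
  intro s _
  unfold Spec_can_divide_into_subsequences can_divide_into_subsequences
    can_divide_into_subsequences_alt
  cases hl : s.toList with
  | nil => simp
  | cons c t =>
    cases t with
    | nil => simp
    | cons d cs =>
      simp only [List.length_cons]
      rw [if_neg (by omega)]
      rw [Bool.eq_iff_iff]
      rw [backtrack_iff_aux (c :: d :: cs) (c :: d :: cs).length 0 rfl (by omega)]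
      rw [go_iff (d :: cs) c 1 [c] (by simp) (by simp) (by simp)]
      simp
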